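-- pv_equiv track=rewrite | github.com/serb00/AlgoExpert | Arrays/Medium/041_best_seat.py | bestSeat
-- ===== SOURCE A (Python) =====
-- def bestSeat(seats):
--     # Write your code here.
--     beg, end, maxDist = 0, 0, 0
--     seat = -1
--
--     for i in range(1, len(seats)):
--         if seats[i] == 0 and seats[i-1] == 1:
--             beg = i
--         if seats[i] == 1 and seats[i-1] == 0:
--             end = i
--             dist = end - beg
--             if dist > maxDist:
--                 seat = (beg + end - 1) // 2
--                 maxDist = dist
--     return seat
-- ===== SOURCE B (Python) =====
-- def bestSeat(seats):
--     n = len(seats)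
--     downs = [i for i in range(1, n) if seats[i-1] == 1 and seats[i] == 0]
--     ups = [i for i in range(1, n) if seats[i-1] == 0 and seats[i] == 1]
--     best_len, best_seat = 0, -1
--     beg = 0
--     for u in ups:
--         while downs and downs[0] < u:
--             beg = downs.pop(0)
--         if u - beg > best_len:
--             best_len = u - beg
--             best_seat = (beg + u - 1) // 2
--     return best_seat
-- ===== Notes on version B (the rewrite author's own statement) =====
-- stated objective: alternative
-- what changed: B first builds index lists of the 1->0 and 0->1 transitions and then merge-scans the two sorted lists with a pointer to find the widest gap, instead of A's single inline transition-detecting pass with beg/end state.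
import Mathlib
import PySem

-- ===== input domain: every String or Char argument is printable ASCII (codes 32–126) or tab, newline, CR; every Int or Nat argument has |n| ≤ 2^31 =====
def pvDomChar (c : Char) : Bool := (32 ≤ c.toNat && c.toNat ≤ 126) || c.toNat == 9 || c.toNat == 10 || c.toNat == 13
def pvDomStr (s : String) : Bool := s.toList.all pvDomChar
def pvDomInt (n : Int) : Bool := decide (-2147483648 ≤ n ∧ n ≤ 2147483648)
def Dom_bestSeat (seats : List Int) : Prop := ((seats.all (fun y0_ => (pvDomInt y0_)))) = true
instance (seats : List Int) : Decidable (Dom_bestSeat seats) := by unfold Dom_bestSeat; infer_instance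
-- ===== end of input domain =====

-- B builds the 1→0 and 0→1 transition-index lists and merge-scans them with a pointer, instead of A's single inline transition-detecting pass (alternative decomposition, same cost).

-- ===== PORT A =====
-- loop body of A's 'for i in range(1, len(seats))', state = (beg, end, maxDist, seat)
def bestSeatStep (seats : List Int) (st : Int × Int × Int × Int) (i : Int) : Int × Int × Int × Int :=
  let (beg, en, maxDist, seat) := st
  let si := PySem.List.pyGetD seats i 0
  let sp := PySem.List.pyGetD seats (i - 1) 0
  let beg := if si = 0 ∧ sp = 1 then i else beg
  if si = 1 ∧ sp = 0 then
    let en := i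
    let dist := en - beg
    if dist > maxDist then (beg, en, dist, PySem.Int.floordiv (beg + en - 1) 2)
    else (beg, en, maxDist, seat)
  else (beg, en, maxDist, seat)

def bestSeat (seats : List Int) : Int :=
  ((PySem.List.pyRange 1 (seats.length : Int) 1).foldl (bestSeatStep seats)
    (0, 0, 0, -1)).2.2.2

-- ===== PORT B =====
-- B's while loop: 'while downs and downs[0] < u: beg = downs.pop(0)'
def advance : List Int → Int → Int → List Int × Int
  | [], _, beg => ([], beg)
  | d :: ds, u, beg => if d < u then advance ds u d else (d :: ds, beg)

-- B's loop body 'for u in ups', state = (downs, beg, best_len, best_seat)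
def bestSeatAltStep (st : List Int × Int × Int × Int) (u : Int) : List Int × Int × Int × Int :=
  let (ds, beg, bl, bs) := st
  let (ds', beg') := advance ds u beg
  if u - beg' > bl then (ds', beg', u - beg', PySem.Int.floordiv (beg' + u - 1) 2)
  else (ds', beg', bl, bs)

def bestSeat_alt (seats : List Int) : Int :=
  let n : Int := seats.length
  let downs := (PySem.List.pyRange 1 n 1).filter
    (fun i => PySem.List.pyGetD seats (i - 1) 0 == 1 && PySem.List.pyGetD seats i 0 == 0)
  let ups := (PySem.List.pyRange 1 n 1).filter
    (fun i => PySem.List.pyGetD seats (i - 1) 0 == 0 && PySem.List.pyGetD seats i 0 == 1)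
  (ups.foldl bestSeatAltStep (downs, 0, 0, -1)).2.2.2

-- ===== PRECONDITION & SPEC =====
def Spec_bestSeat (seats : List Int) (out : Int) : Prop := out = bestSeat_alt seats
instance (seats : List Int) (out : Int) : Decidable (Spec_bestSeat seats out) := by unfold Spec_bestSeat; infer_instance

-- ===== CLAIM (what is proved, stated in full; the proofs are below) =====
def Claim_equal_bestSeat : Prop := ∀ (seats : List Int), Dom_bestSeat seats → Spec_bestSeat seats (bestSeat seats)

-- ===== LEMMAS AND PROOFS =====

-- structural version of A's loop: prev = seats[i-1], rest = seats.drop i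
def goA (prev : Int) (i : Int) : List Int → Int × Int × Int × Int → Int × Int × Int × Int
  | [], st => st
  | c :: rest, st =>
    let (beg, en, maxDist, seat) := st
    let beg := if c = 0 ∧ prev = 1 then i else beg
    let st' :=
      if c = 1 ∧ prev = 0 then
        if i - beg > maxDist then (beg, i, i - beg, PySem.Int.floordiv (beg + i - 1) 2)
        else (beg, i, maxDist, seat)
      else (beg, en, maxDist, seat)
    goA c (i + 1) rest st'

-- indices i with (seats[i-1], seats[i]) = (a, b), scanning rest = drop of the seats with prev before it
def transIdx (a b : Int) (prev : Int) (i : Int) : List Int → List Int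
  | [] => []
  | c :: rest =>
    if prev = a ∧ c = b then i :: transIdx a b c (i + 1) rest
    else transIdx a b c (i + 1) rest

lemma foldA_eq (seats : List Int) : ∀ (rest : List Int) (i : Nat) (prev : Int)
    (st : Int × Int × Int × Int), 1 ≤ i → seats.drop i = rest → seats[i-1]? = some prev →
    (PySem.List.pyRange (i : Int) (seats.length : Int) 1).foldl (bestSeatStep seats) st
      = goA prev (i : Int) rest st := by
  intro rest
  induction rest with
  | nil =>
    intro i prev st h1 hdrop _
    have hlen : seats.length ≤ i := by
      by_contra h
      have := List.drop_eq_nil_iff.mp hdrop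
      omega
    rw [PySem.List.pyRange_one_eq_nil (by exact_mod_cast hlen)]
    rfl
  | cons c rest ih =>
    intro i prev st h1 hdrop hprev
    obtain ⟨beg, en, maxDist, seat⟩ := st
    have hi : i < seats.length := by
      by_contra h
      have hlen := congrArg List.length hdrop
      simp [List.length_drop] at hlen
      omega
    have hci : seats[i]? = some c := by
      have := congrArg (fun l => l.head?) hdrop
      simpa [List.head?_drop] using this
    have hdrop' : seats.drop (i + 1) = rest := by
      have := congrArg List.tail hdrop
      simpa [List.tail_drop] using this
    rw [PySem.List.pyRange_one_cons (by exact_mod_cast hi), List.foldl_cons]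
    have h1' : PySem.List.pyGetD seats (i : Int) 0 = c := by
      simp [PySem.List.pyGetD_natCast, List.getD, hci]
    have h2' : PySem.List.pyGetD seats ((i : Int) - 1) 0 = prev := by
      have hcast : ((i : Int) - 1) = ((i - 1 : Nat) : Int) := by omega
      rw [hcast, PySem.List.pyGetD_natCast]
      simp [List.getD, hprev]
    have hstep : bestSeatStep seats (beg, en, maxDist, seat) (i : Int) =
        (if c = 1 ∧ prev = 0 then
          if (i : Int) - (if c = 0 ∧ prev = 1 then (i : Int) else beg) > maxDist then
            ((if c = 0 ∧ prev = 1 then (i : Int) else beg), (i : Int),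
              (i : Int) - (if c = 0 ∧ prev = 1 then (i : Int) else beg),
              PySem.Int.floordiv ((if c = 0 ∧ prev = 1 then (i : Int) else beg) + (i : Int) - 1) 2)
          else ((if c = 0 ∧ prev = 1 then (i : Int) else beg), (i : Int), maxDist, seat)
        else ((if c = 0 ∧ prev = 1 then (i : Int) else beg), en, maxDist, seat)) := by
      simp only [bestSeatStep, h1', h2']
    rw [hstep]
    simp only [goA]
    rw [show ((i : Int) + 1) = ((i + 1 : Nat) : Int) by push_cast; ring]
    exact ih (i + 1) c _ (by omega) hdrop' (by simpa using hci)


lemma mem_transIdx {a b : Int} : ∀ (rest : List Int) (prev i x : Int),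
    x ∈ transIdx a b prev i rest → i ≤ x := by
  intro rest
  induction rest with
  | nil => intro prev i x hx; simp [transIdx] at hx
  | cons c r ih =>
    intro prev i x hx
    simp only [transIdx] at hx
    split_ifs at hx with h
    · rcases List.mem_cons.mp hx with h' | h'
      · omega
      · have := ih c (i + 1) x h'; omega
    · have := ih c (i + 1) x hx; omega

lemma filter_eq (seats : List Int) (a b : Int) : ∀ (rest : List Int) (i : Nat) (prev : Int),
    1 ≤ i → seats.drop i = rest → seats[i-1]? = some prev →
    (PySem.List.pyRange (i : Int) (seats.length : Int) 1).filter
      (fun k => PySem.List.pyGetD seats (k - 1) 0 == a && PySem.List.pyGetD seats k 0 == b)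
      = transIdx a b prev (i : Int) rest := by
  intro rest
  induction rest with
  | nil =>
    intro i prev h1 hdrop _
    have hlen : seats.length ≤ i := by
      by_contra h
      have := List.drop_eq_nil_iff.mp hdrop
      omega
    rw [PySem.List.pyRange_one_eq_nil (by exact_mod_cast hlen)]
    rfl
  | cons c rest ih =>
    intro i prev h1 hdrop hprev
    have hi : i < seats.length := by
      by_contra h
      have hlen := congrArg List.length hdrop
      simp [List.length_drop] at hlen
      omega
    have hci : seats[i]? = some c := by
      have := congrArg (fun l => l.head?) hdrop
      simpa [List.head?_drop] using this
    have hdrop' : seats.drop (i + 1) = rest := by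
      have := congrArg List.tail hdrop
      simpa [List.tail_drop] using this
    rw [PySem.List.pyRange_one_cons (by exact_mod_cast hi), List.filter_cons]
    have h1' : PySem.List.pyGetD seats (i : Int) 0 = c := by
      simp [PySem.List.pyGetD_natCast, List.getD, hci]
    have h2' : PySem.List.pyGetD seats ((i : Int) - 1) 0 = prev := by
      have hcast : ((i : Int) - 1) = ((i - 1 : Nat) : Int) := by omega
      rw [hcast, PySem.List.pyGetD_natCast]
      simp [List.getD, hprev]
    have hrec := ih (i + 1) c (by omega) hdrop' (by simpa using hci)
    simp only [h1', h2', transIdx]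
    rw [show ((i : Int) + 1) = ((i + 1 : Nat) : Int) by push_cast; ring]
    by_cases h : prev = a ∧ c = b
    · rw [if_pos (by simp [h.1, h.2]), if_pos h, hrec]
    · have : ¬ (prev == a && c == b) = true := by
        simp only [Bool.and_eq_true, beq_iff_eq]
        exact h
      rw [if_neg this, if_neg h, hrec]

lemma advance_skip : ∀ (ds : List Int) (u beg : Int), (∀ d ∈ ds, ¬ d < u) →
    advance ds u beg = (ds, beg) := by
  intro ds u beg h
  cases ds with
  | nil => rfl
  | cons d ds => simp only [advance]; rw [if_neg (h d (List.mem_cons_self ..))]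

lemma fold_shift (d : Int) : ∀ (ups : List Int) (ds : List Int) (beg md seat : Int),
    (∀ u ∈ ups, d < u) →
    (ups.foldl bestSeatAltStep (d :: ds, beg, md, seat)).2.2.2
      = (ups.foldl bestSeatAltStep (ds, d, md, seat)).2.2.2 := by
  intro ups ds beg md seat h
  cases ups with
  | nil => rfl
  | cons u us =>
    have hd : d < u := h u (List.mem_cons_self ..)
    simp only [List.foldl_cons, bestSeatAltStep, advance, if_pos hd]

lemma merge_eq : ∀ (rest : List Int) (prev i beg en md seat : Int),
    (goA prev i rest (beg, en, md, seat)).2.2.2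
      = ((transIdx 0 1 prev i rest).foldl bestSeatAltStep
          (transIdx 1 0 prev i rest, beg, md, seat)).2.2.2 := by
  intro rest
  induction rest with
  | nil => intro prev i beg en md seat; rfl
  | cons c rest ih =>
    intro prev i beg en md seat
    simp only [goA, transIdx]
    by_cases h10 : c = 0 ∧ prev = 1
    · -- a 1→0 transition at i: A opens a gap, B records a down index
      have h01 : ¬ (c = 1 ∧ prev = 0) := by omega
      rw [if_pos h10, if_neg h01]
      rw [if_pos (show prev = 1 ∧ c = 0 from ⟨h10.2, h10.1⟩),
          if_neg (show ¬ (prev = 0 ∧ c = 1) by rintro ⟨hx, hy⟩; omega)]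
      rw [ih c (i + 1) i en md seat]
      exact (fold_shift i _ _ _ _ _ (fun u hu => by have := mem_transIdx rest c (i + 1) u hu; omega)).symm
    · by_cases h01 : c = 1 ∧ prev = 0
      · -- a 0→1 transition at i: A closes the gap, B processes up index i
        rw [if_neg h10, if_pos h01]
        rw [if_pos (show prev = 0 ∧ c = 1 from ⟨h01.2, h01.1⟩),
            if_neg (show ¬ (prev = 1 ∧ c = 0) by rintro ⟨hx, hy⟩; omega)]
        rw [List.foldl_cons]
        have hadv : advance (transIdx 1 0 c (i + 1) rest) i beg = (transIdx 1 0 c (i + 1) rest, beg) :=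
          advance_skip _ _ _ (fun d hd => by have := mem_transIdx rest c (i + 1) d hd; omega)
        by_cases hd : i - beg > md
        · rw [if_pos hd, ih c (i + 1) beg i (i - beg) (PySem.Int.floordiv (beg + i - 1) 2)]
          simp only [bestSeatAltStep, hadv, if_pos hd]
        · rw [if_neg hd, ih c (i + 1) beg i md seat]
          simp only [bestSeatAltStep, hadv, if_neg hd]
      · -- no transition at i: both sides idle
        rw [if_neg h10, if_neg h01]
        rw [if_neg (show ¬ (prev = 1 ∧ c = 0) by rintro ⟨hx, hy⟩; exact h10 ⟨hy, hx⟩),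
            if_neg (show ¬ (prev = 0 ∧ c = 1) by rintro ⟨hx, hy⟩; exact h01 ⟨hy, hx⟩)]
        exact ih c (i + 1) beg en md seat

-- ===== VERDICT (by name: the statement is the Claim_ definition above) =====
theorem bestSeat_spec : Claim_equal_bestSeat := by
  intro seats _
  unfold Spec_bestSeat bestSeat bestSeat_alt
  cases seats with
  | nil => rfl
  | cons h t =>
    have hA := foldA_eq (h :: t) t 1 h (0, 0, 0, -1) (by omega) (by simp) (by simp)
    have hD := filter_eq (h :: t) 1 0 t 1 h (by omega) (by simp) (by simp)
    have hU := filter_eq (h :: t) 0 1 t 1 h (by omega) (by simp) (by simp)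
    simp only [Nat.cast_one] at hA hD hU
    rw [hA]
    simp only [hD, hU]
    exact merge_eq t h 1 0 0 0 (-1)
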